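-- pv_equiv track=rewrite | github.com/efreim/UJ-Python | 11/lists.py | almost_sorted_reversed_list
-- ===== SOURCE A (Python) =====
-- def almost_sorted_reversed_list(n):
--     my_list = []
--     for item in range(0, n):
--         if item % 3 == 0:
--             my_list.insert(item, item)
--             tmp = my_list[item]
--             my_list[item] = my_list[item - 1]
--             my_list[item - 1] = tmp
--         else:
--             my_list.insert(item, item)
--     reversed_list = my_list[::-1]
--     return reversed_list
-- ===== SOURCE B (Python) =====
-- def almost_sorted_reversed_list(n):
--     def f(j):
--         if j % 3 == 2 and j + 1 < n:
--             return j + 1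
--         if j % 3 == 0 and j >= 3:
--             return j - 1
--         return j
--     return [f(j) for j in range(n - 1, -1, -1)]
-- ===== Notes on version B (the rewrite author's own statement) =====
-- stated objective: simpler
-- what changed: B replaces A's incremental insert-then-swap construction of a mutable list with a direct closed-form comprehension over a descending range computing each position's final value, eliminating the intermediate list, the swaps and the reversing slice.
import Mathlib
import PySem

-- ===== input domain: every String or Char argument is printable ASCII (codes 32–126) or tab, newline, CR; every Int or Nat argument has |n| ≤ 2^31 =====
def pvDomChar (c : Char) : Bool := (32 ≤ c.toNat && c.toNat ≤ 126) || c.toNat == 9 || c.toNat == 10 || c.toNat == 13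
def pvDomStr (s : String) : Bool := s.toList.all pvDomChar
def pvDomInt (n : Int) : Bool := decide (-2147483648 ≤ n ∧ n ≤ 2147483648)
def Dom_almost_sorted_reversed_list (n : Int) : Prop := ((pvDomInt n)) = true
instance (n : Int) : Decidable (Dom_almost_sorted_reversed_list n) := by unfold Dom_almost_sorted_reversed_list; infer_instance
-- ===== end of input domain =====

-- B builds the result directly by a closed-form per-position formula instead of A's insert-and-swap construction (objective: simpler).

-- ===== PORT A =====
-- one loop iteration of A: insert item at position item, and when item % 3 == 0 swap my_list[item] with my_list[item-1]
def pvStepA (acc : List Int) (item : Int) : List Int :=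
  if item % 3 == 0 then
    let a1 := PySem.List.insert acc item item
    let tmp := PySem.List.pyGetD a1 item 0
    let a2 := PySem.List.pySetD a1 item (PySem.List.pyGetD a1 (item - 1) 0)
    PySem.List.pySetD a2 (item - 1) tmp
  else PySem.List.insert acc item item

def almost_sorted_reversed_list (n : Int) : List Int :=
  let my_list := (PySem.List.pyRange 0 n 1).foldl pvStepA []
  (PySem.List.slice? my_list none none (-1)).getD []

-- ===== PORT B =====
def almost_sorted_reversed_list_alt (n : Int) : List Int :=
  (PySem.List.pyRange (n - 1) (-1) (-1)).map (fun j =>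
    if j % 3 = 2 ∧ j + 1 < n then j + 1
    else if j % 3 = 0 ∧ 3 ≤ j then j - 1
    else j)

-- ===== PRECONDITION & SPEC =====
def Spec_almost_sorted_reversed_list (n : Int) (out : List Int) : Prop := out = almost_sorted_reversed_list_alt n
instance (n : Int) (out : List Int) : Decidable (Spec_almost_sorted_reversed_list n out) := by unfold Spec_almost_sorted_reversed_list; infer_instance

-- ===== CLAIM (what is proved, stated in full; the proofs are below) =====
def Claim_equal_almost_sorted_reversed_list : Prop := ∀ (n : Int), Dom_almost_sorted_reversed_list n → Spec_almost_sorted_reversed_list n (almost_sorted_reversed_list n)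

-- ===== LEMMAS AND PROOFS =====

-- the closed-form value at (Nat) position k of A's unreversed list of length m
def pvG (m k : Nat) : Int :=
  if k % 3 = 2 ∧ k + 1 < m then (k : Int) + 1
  else if k % 3 = 0 ∧ 3 ≤ k then (k : Int) - 1
  else (k : Int)

theorem pvInsert_closed (N : Nat) :
    PySem.List.insert ((List.range N).map (pvG N)) (N : Int) (N : Int)
      = (List.range N).map (pvG N) ++ [(N : Int)] := by
  rw [PySem.List.insert_natCast _ N _ (by simp),
    List.take_of_length_le (by simp), List.drop_eq_nil_of_le (by simp)]

-- one application of pvStepA advances the closed-form list from length N to length N+1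
theorem pvStep_closed (N : Nat) :
    pvStepA ((List.range N).map (pvG N)) (N : Int) = (List.range (N + 1)).map (pvG (N + 1)) := by
  have hlen : ((List.range N).map (pvG N)).length = N := by simp
  by_cases h0 : (N : Int) % 3 = 0
  · have hN3 : N % 3 = 0 := by omega
    rcases Nat.eq_zero_or_pos N with hN | hNpos
    · subst hN; decide
    · have hN3' : 3 ≤ N := by omega
      have hcast : (N : Int) - 1 = ((N - 1 : Nat) : Int) := by omega
      simp only [pvStepA, h0, beq_self_eq_true, if_pos, pvInsert_closed, hcast,
        PySem.List.pyGetD_natCast, PySem.List.pySetD_natCast]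
      have htmp : ((List.range N).map (pvG N) ++ [(N : Int)]).getD N 0 = (N : Int) := by
        rw [List.getD_eq_getElem _ _ (by simp),
          List.getElem_append_right (by simp)]
        simp
      have hprev : ((List.range N).map (pvG N) ++ [(N : Int)]).getD (N - 1) 0
          = (N : Int) - 1 := by
        rw [List.getD_eq_getElem _ _
            (by simp only [List.length_append, List.length_map, List.length_range]; omega),
          List.getElem_append_left
            (by simp only [List.length_map, List.length_range]; omega)]
        simp only [List.getElem_map, List.getElem_range]
        unfold pvG
        split_ifs <;> omega
      rw [htmp, hprev]
      have hset1 : ((List.range N).map (pvG N) ++ [(N : Int)]).set N ((N : Int) - 1)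
          = (List.range N).map (pvG N) ++ [(N : Int) - 1] := by
        rw [List.set_append]
        simp
      rw [hset1, List.set_append, if_pos (by simp; omega)]
      rw [List.range_succ, List.map_append]
      congr 1
      · apply List.ext_getElem
        · simp
        · intro i h1 h2
          simp only [List.length_set, List.length_map, List.length_range] at h1 h2
          rw [List.getElem_set]
          simp only [List.getElem_map, List.getElem_range]
          by_cases hi : N - 1 = i
          · simp only [if_pos hi]
            unfold pvG
            split_ifs <;> omega
          · simp only [if_neg hi, List.getElem_map, List.getElem_range]
            unfold pvG
            split_ifs <;> omega
      · simp only [List.map_cons, List.map_nil]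
        unfold pvG
        split_ifs with hA hB
        · exfalso; omega
        · rfl
        · exfalso; omega
  · have hN3 : ¬ N % 3 = 0 := by omega
    rw [pvStepA, if_neg (by simpa using h0), pvInsert_closed, List.range_succ, List.map_append]
    congr 1
    · refine List.map_congr_left ?_
      intro k hk
      have hkN : k < N := List.mem_range.mp hk
      unfold pvG
      split_ifs <;> omega
    · simp only [List.map_cons, List.map_nil]
      unfold pvG
      split_ifs <;> [omega; omega; rfl]

-- A's loop computes the closed form
theorem pvLoopA_eq (N : Nat) :
    (PySem.List.pyRange 0 (N : Int) 1).foldl pvStepA [] = (List.range N).map (pvG N) := by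
  induction N with
  | zero => simp [PySem.List.pyRange_one_eq_nil]
  | succ N ih =>
    have hsplit : PySem.List.pyRange 0 ((N : Int) + 1) 1
        = PySem.List.pyRange 0 (N : Int) 1 ++ [(N : Int)] :=
      PySem.List.pyRange_one_succ_right (by positivity)
    push_cast
    rw [hsplit, List.foldl_append, ih, List.foldl_cons, List.foldl_nil, pvStep_closed]

-- ===== VERDICT (by name: the statement is the Claim_ definition above) =====
theorem almost_sorted_reversed_list_spec : Claim_equal_almost_sorted_reversed_list := by
  intro n _
  unfold Spec_almost_sorted_reversed_list almost_sorted_reversed_list_alt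
  rw [show almost_sorted_reversed_list n
      = (PySem.List.slice? ((PySem.List.pyRange 0 n 1).foldl pvStepA []) none none (-1)).getD []
      from rfl]
  rw [PySem.List.slice?_none_none_neg_one]
  rw [PySem.List.pyRange_neg_one_eq_reverse]
  simp only [Option.getD_some]
  have hb : (-1 : Int) + 1 = 0 := by norm_num
  rw [hb]
  have hn1 : n - 1 + 1 = n := by omega
  rw [hn1, List.map_reverse]
  congr 1
  by_cases hn : 0 < n
  · have hN : n = (n.toNat : Int) := by omega
    rw [hN, pvLoopA_eq, PySem.List.pyRange_one]
    rw [List.map_map]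
    refine List.map_congr_left ?_
    intro k hk
    have hkN : k < n.toNat := List.mem_range.mp hk
    simp only [Function.comp_apply, zero_add]
    unfold pvG
    split_ifs <;> omega
  · rw [PySem.List.pyRange_one_eq_nil (by omega)]
    simp
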